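-- pv_equiv track=rewrite | github.com/thalesjacobi/obelisk-stamps | ml/stamp_detector/detector.py | _pick_up_to_n
-- ===== SOURCE A (Python) =====
-- from typing import List, Optional, Tuple, Union
--
-- def _pick_up_to_n(cuts: List[int], size: int, max_cuts: int = 2, min_spacing: Optional[int] = None) -> List[int]:
--     """
--     Select up to N well-spaced cuts, preferring evenly-distributed positions.
--
--     For max_cuts=1: prefers center (1/2)
--     For max_cuts=2: prefers 1/3 and 2/3
--     For max_cuts=3: prefers 1/4, 1/2, 3/4
--     """
--     if not cuts:
--         return []
--
--     if min_spacing is None: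
--         min_spacing = max(6, size // 12)
--
--     # Generate ideal target positions based on number of desired cuts
--     if max_cuts == 1:
--         targets = [size // 2]
--     elif max_cuts == 2:
--         targets = [size // 3, (2 * size) // 3, size // 2]
--     else:
--         targets = [int(size * (i + 1) / (max_cuts + 1)) for i in range(max_cuts)]
--         targets.append(size // 2)
--
--     scored = sorted([(min(abs(c - t) for t in targets), c) for c in cuts])
--     chosen = []
--     for _, c in scored:
--         if all(abs(c - x) > min_spacing for x in chosen):
--             chosen.append(c)
--         if len(chosen) == max_cuts:
--             break
--     return sorted(chosen)
-- ===== SOURCE B (Python) =====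
-- from typing import List, Optional
--
-- def _pick_up_to_n(cuts: List[int], size: int, max_cuts: int = 2, min_spacing: Optional[int] = None) -> List[int]:
--     """Repeated best-candidate selection: instead of sorting all scored cuts and
--     greedily scanning the sorted list once, each round filters the remaining pool
--     down to the candidates spaced from every chosen cut and takes the minimum."""
--     if not cuts:
--         return []
--
--     spacing = max(6, size // 12) if min_spacing is None else min_spacing
--
--     if max_cuts == 2:
--         targets = [size // 3, (2 * size) // 3, size // 2]
--     elif max_cuts == 1:
--         targets = [size // 2]
--     else:
--         targets = [int(size * (i + 1) / (max_cuts + 1)) for i in range(max_cuts)] + [size // 2]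
--
--     def score(c):
--         best = abs(c - targets[0])
--         for t in targets[1:]:
--             d = abs(c - t)
--             if d < best:
--                 best = d
--         return best
--
--     def spaced(c, chosen):
--         for x in chosen:
--             if abs(c - x) <= spacing:
--                 return False
--         return True
--
--     pool = [(score(c), c) for c in cuts]
--     chosen = []
--     while True:
--         cand = [p for p in pool if spaced(p[1], chosen)]
--         if not cand:
--             break
--         b = min(cand)
--         chosen.append(b[1])
--         if len(chosen) == max_cuts:
--             break
--         pool.remove(b)
--     return sorted(chosen)
-- ===== Notes on version B (the rewrite author's own statement) =====
-- stated objective: alternative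
-- what changed: Replaces A's sort-all-scored-candidates-then-one-greedy-scan with a repeated-selection loop: each round filters the remaining pool to the candidates spaced more than min_spacing from every chosen cut, takes the lexicographically minimal (score, cut) pair, removes it, until max_cuts are chosen or none qualifies.
import Mathlib
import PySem

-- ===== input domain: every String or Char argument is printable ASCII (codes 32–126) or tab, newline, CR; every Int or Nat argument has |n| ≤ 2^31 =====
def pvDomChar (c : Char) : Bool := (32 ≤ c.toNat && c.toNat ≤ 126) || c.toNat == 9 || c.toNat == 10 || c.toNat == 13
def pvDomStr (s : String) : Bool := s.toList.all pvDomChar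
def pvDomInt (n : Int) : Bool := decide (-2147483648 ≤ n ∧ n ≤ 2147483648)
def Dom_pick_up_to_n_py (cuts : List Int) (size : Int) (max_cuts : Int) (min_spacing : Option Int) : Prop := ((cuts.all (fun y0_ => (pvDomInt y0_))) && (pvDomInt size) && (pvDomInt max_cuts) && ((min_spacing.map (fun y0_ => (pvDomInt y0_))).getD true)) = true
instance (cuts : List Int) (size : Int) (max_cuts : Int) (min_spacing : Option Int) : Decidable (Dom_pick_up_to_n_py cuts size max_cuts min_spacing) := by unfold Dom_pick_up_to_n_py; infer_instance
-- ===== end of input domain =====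

-- B replaces A's sort-then-one-greedy-scan by a repeated-selection loop that each round
-- filters the remaining pool to the spaced candidates and takes the minimal (score, cut)
-- pair (objective: alternative decomposition, same results).

-- ===== PORT A =====

-- exact port of `int(a / d)` for Python ints with d > 0 and |a| < 2^62·4 (used by both
-- Pythons' identical targets line): CPython's int.__truediv__ is the correctly-rounded
-- (round-half-to-even) IEEE double of the exact rational a/d, and int() truncates toward
-- zero; this computes exactly that (no overflow/subnormal handling needed here).
def pvTruncTrueDiv (a d : Int) : Int :=
  if a = 0 then 0
  else
    let n : Nat := a.natAbs
    let dn : Nat := d.natAbs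
    let e1 : Int := (Nat.log2 n : Int) - (Nat.log2 dn : Int)
    let e : Int :=
      if (if 0 ≤ e1 then n < dn <<< e1.toNat else n <<< (-e1).toNat < dn) then e1 - 1 else e1
    let s : Int := 52 - e
    let num : Nat := if 0 ≤ s then n <<< s.toNat else n
    let den : Nat := if 0 ≤ s then dn else dn <<< (-s).toNat
    let q : Nat := num / den
    let r : Nat := num % den
    let q' : Nat := if 2 * r > den ∨ (2 * r = den ∧ q % 2 = 1) then q + 1 else q
    let t : Nat := if 0 ≤ s then q' >>> s.toNat else q' <<< (-s).toNat
    if a < 0 then -(t : Int) else (t : Int)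

-- A: `if min_spacing is None: min_spacing = max(6, size // 12)`
def pvSpacing (size : Int) (min_spacing : Option Int) : Int :=
  match min_spacing with
  | some v => v
  | none => max 6 (PySem.Int.floordiv size 12)

-- A's target construction (branch order as in A: max_cuts == 1 first)
def pvTargets (size max_cuts : Int) : List Int :=
  if max_cuts = 1 then [PySem.Int.floordiv size 2]
  else if max_cuts = 2 then
    [PySem.Int.floordiv size 3, PySem.Int.floordiv (2 * size) 3, PySem.Int.floordiv size 2]
  else
    ((PySem.List.pyRange 0 max_cuts 1).map (fun i => pvTruncTrueDiv (size * (i + 1)) (max_cuts + 1)))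
      ++ [PySem.Int.floordiv size 2]

-- min(abs(c - t) for t in targets); targets is never empty, so the default is never used
def pvScore (targets : List Int) (c : Int) : Int :=
  (PySem.List.min? (targets.map (fun t => |c - t|)) (fun x => x)).getD 0

-- all(abs(c - x) > min_spacing for x in chosen)
def pvQual (ms : Int) (chosen : List Int) (c : Int) : Bool :=
  chosen.all (fun x => decide (ms < |c - x|))

-- A's greedy scan over the sorted scored list, with the len(chosen) == max_cuts break
def pickA (ms mc : Int) : List (Int × Int) → List Int → List Int
  | [], chosen => chosen
  | (_, c) :: rest, chosen =>
    let chosen' := if pvQual ms chosen c then chosen ++ [c] else chosen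
    if (chosen'.length : Int) = mc then chosen' else pickA ms mc rest chosen'

def pick_up_to_n_py (cuts : List Int) (size : Int) (max_cuts : Int) (min_spacing : Option Int) : List Int :=
  if cuts = [] then []
  else
    let ms := pvSpacing size min_spacing
    let targets := pvTargets size max_cuts
    let scored := PySem.List.sorted2 (cuts.map (fun c => (pvScore targets c, c))) Prod.fst Prod.snd
    PySem.List.sorted (pickA ms max_cuts scored []) (fun x => x)

-- ===== PORT B =====

-- B: `spacing = max(6, size // 12) if min_spacing is None else min_spacing`
def bSpacing (size : Int) (min_spacing : Option Int) : Int :=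
  min_spacing.getD (max 6 (PySem.Int.floordiv size 12))

-- B's target construction (B tests max_cuts == 2 first)
def bTargets (size max_cuts : Int) : List Int :=
  if max_cuts = 2 then
    [PySem.Int.floordiv size 3, PySem.Int.floordiv (2 * size) 3, PySem.Int.floordiv size 2]
  else if max_cuts = 1 then [PySem.Int.floordiv size 2]
  else
    ((PySem.List.pyRange 0 max_cuts 1).map (fun i => pvTruncTrueDiv (size * (i + 1)) (max_cuts + 1)))
      ++ [PySem.Int.floordiv size 2]

-- B's score(c): running minimum over targets[1:] starting from abs(c - targets[0])
def bScoreGo (c : Int) : List Int → Int → Int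
  | [], best => best
  | t :: ts, best => bScoreGo c ts (if |c - t| < best then |c - t| else best)

-- targets is never empty, so the [] branch (Python: IndexError) is unreachable
def bScore (targets : List Int) (c : Int) : Int :=
  match targets with
  | [] => 0
  | t :: rest => bScoreGo c rest |c - t|

-- B's spaced(c, chosen): early-exit loop
def bOk (sp c : Int) : List Int → Bool
  | [] => true
  | x :: xs => if |c - x| ≤ sp then false else bOk sp c xs

-- B's while loop: filter the pool, take min(cand) (Python tuple min = min2?), remove it;
-- fuel = pool.length makes it total (each recursive step erases one pool element)
def bSelect (sp mc : Int) : Nat → List (Int × Int) → List Int → List Int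
  | 0, _, chosen => chosen
  | fuel + 1, pool, chosen =>
    match PySem.List.min2? (pool.filter (fun p => bOk sp p.2 chosen)) Prod.fst Prod.snd with
    | none => chosen
    | some b =>
      let chosen' := chosen ++ [b.2]
      if (chosen'.length : Int) = mc then chosen'
      else bSelect sp mc fuel (pool.erase b) chosen'

def pick_up_to_n_py_alt (cuts : List Int) (size : Int) (max_cuts : Int) (min_spacing : Option Int) : List Int :=
  if cuts = [] then []
  else
    let sp := bSpacing size min_spacing
    let targets := bTargets size max_cuts
    let pool := cuts.map (fun c => (bScore targets c, c))
    PySem.List.sorted (bSelect sp max_cuts pool.length pool []) (fun x => x)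

-- ===== PRECONDITION & SPEC =====
def Spec_pick_up_to_n_py (cuts : List Int) (size : Int) (max_cuts : Int) (min_spacing : Option Int) (out : List Int) : Prop := out = pick_up_to_n_py_alt cuts size max_cuts min_spacing
instance (cuts : List Int) (size : Int) (max_cuts : Int) (min_spacing : Option Int) (out : List Int) : Decidable (Spec_pick_up_to_n_py cuts size max_cuts min_spacing out) := by unfold Spec_pick_up_to_n_py; infer_instance

-- ===== CLAIM (what is proved, stated in full; the proofs are below) =====
def Claim_equal_pick_up_to_n_py : Prop := ∀ (cuts : List Int) (size : Int) (max_cuts : Int) (min_spacing : Option Int), Dom_pick_up_to_n_py cuts size max_cuts min_spacing → Spec_pick_up_to_n_py cuts size max_cuts min_spacing (pick_up_to_n_py cuts size max_cuts min_spacing)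

-- ===== LEMMAS AND PROOFS =====

-- the Python lexicographic comparison (score, c) < (score', c'), used only by the proofs
def pvLt (a b : Int × Int) : Bool :=
  decide (a.1 < b.1) || (decide (a.1 = b.1) && decide (a.2 < b.2))

-- lexicographic-order facts on Int × Int
theorem lex_antisymm {a b : Int × Int} (h1 : pvLt a b = false) (h2 : pvLt b a = false) : a = b := by
  rcases a with ⟨a1, a2⟩; rcases b with ⟨b1, b2⟩
  simp only [pvLt, Bool.or_eq_false_iff, Bool.and_eq_false_iff, decide_eq_false_iff_not] at h1 h2
  have : a1 = b1 ∧ a2 = b2 := by constructor <;> omega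
  simp [this.1, this.2]

theorem lex1 {x a b : Int × Int} (h1 : pvLt x a = false) (h2 : pvLt b a = true ∨ b = a) : pvLt x b = false := by
  rcases h2 with h2 | rfl
  · rcases x with ⟨x1, x2⟩; rcases a with ⟨a1, a2⟩; rcases b with ⟨b1, b2⟩
    simp only [pvLt, Bool.or_eq_false_iff, Bool.and_eq_false_iff, decide_eq_false_iff_not,
      Bool.or_eq_true, Bool.and_eq_true, decide_eq_true_eq] at *
    constructor <;> omega
  · exact h1

theorem lex2 {x a b : Int × Int} (h1 : pvLt x a = true) (h2 : pvLt b x = true ∨ b = x) : pvLt b a = true := by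
  rcases h2 with h2 | rfl
  · rcases x with ⟨x1, x2⟩; rcases a with ⟨a1, a2⟩; rcases b with ⟨b1, b2⟩
    simp only [pvLt, Bool.or_eq_true, Bool.and_eq_true, decide_eq_true_eq] at *
    omega
  · exact h1

theorem lex3 {x b : Int × Int} (h : pvLt b x = true ∨ b = x) : pvLt x b = false := by
  rcases x with ⟨x1, x2⟩; rcases b with ⟨b1, b2⟩
  rcases h with h | h
  · simp only [pvLt, Bool.or_eq_true, Bool.and_eq_true, decide_eq_true_eq] at h
    simp only [pvLt, Bool.or_eq_false_iff, Bool.and_eq_false_iff, decide_eq_false_iff_not]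
    constructor <;> omega
  · injection h with h1 h2
    subst h1; subst h2
    simp [pvLt]

theorem lex4 {x y z : Int × Int} (h1 : pvLt x y = true) (h2 : pvLt z y = false) : pvLt z x = false := by
  rcases x with ⟨x1, x2⟩; rcases y with ⟨y1, y2⟩; rcases z with ⟨z1, z2⟩
  simp only [pvLt, Bool.or_eq_true, Bool.and_eq_true, decide_eq_true_eq,
    Bool.or_eq_false_iff, Bool.and_eq_false_iff, decide_eq_false_iff_not] at *
  constructor <;> omega

-- the qualification test only gets stricter as chosen grows
theorem pvQual_mono {ms : Int} {ch : List Int} {c y : Int} (h : pvQual ms ch c = false) :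
    pvQual ms (ch ++ [y]) c = false := by
  unfold pvQual at *
  simp only [List.all_append, Bool.and_eq_false_iff]
  exact Or.inl h

-- sorted2's comparison equals pvLt on Int × Int
theorem bef_eq_pvLt (a b : Int × Int) :
    (decide (a.1 < b.1) || (!decide (b.1 < a.1) && decide (a.2 < b.2))) = pvLt a b := by
  rcases a with ⟨a1, a2⟩; rcases b with ⟨b1, b2⟩
  unfold pvLt
  by_cases h1 : a1 < b1
  · simp [h1]
  · by_cases h2 : b1 < a1
    · simp [h1, h2, show ¬ a1 = b1 by omega]
    · simp [show a1 = b1 by omega]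

theorem insertBy_pairwise (bef : Int × Int → Int × Int → Bool)
    (hb : ∀ a b, bef a b = pvLt a b) (x : Int × Int) :
    ∀ (ys : List (Int × Int)), ys.Pairwise (fun a b => pvLt b a = false) →
      (PySem.List.insertBy bef x ys).Pairwise (fun a b => pvLt b a = false) := by
  intro ys
  induction ys with
  | nil => intro _; simp [PySem.List.insertBy]
  | cons y ys ih =>
    intro h
    rw [List.pairwise_cons] at h
    obtain ⟨hy, hys⟩ := h
    by_cases hxy : bef x y = true
    · rw [PySem.List.insertBy, if_pos hxy]
      have hlt : pvLt x y = true := by rw [← hb]; exact hxy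
      refine List.Pairwise.cons ?_ (List.Pairwise.cons hy hys)
      intro z hz
      rcases List.mem_cons.mp hz with rfl | hz
      · exact lex3 (Or.inl hlt)
      · exact lex4 hlt (hy z hz)
    · rw [PySem.List.insertBy, if_neg hxy]
      refine List.Pairwise.cons ?_ (ih hys)
      intro z hz
      rcases (PySem.List.mem_insertBy bef x z ys).mp hz with rfl | hz
      · rw [← hb]; exact Bool.eq_false_iff.mpr hxy
      · exact hy z hz

theorem foldl_insertBy_pairwise (bef : Int × Int → Int × Int → Bool)
    (hb : ∀ a b, bef a b = pvLt a b) :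
    ∀ (xs acc : List (Int × Int)), acc.Pairwise (fun a b => pvLt b a = false) →
      (List.foldl (fun acc x => PySem.List.insertBy bef x acc) acc xs).Pairwise
        (fun a b => pvLt b a = false) := by
  intro xs
  induction xs with
  | nil => intro acc h; simpa using h
  | cons x xs ih =>
    intro acc h
    exact ih _ (insertBy_pairwise bef hb x acc h)

theorem sorted2_pairwise' (xs : List (Int × Int)) :
    (PySem.List.sorted2 xs Prod.fst Prod.snd).Pairwise (fun a b => pvLt b a = false) := by
  unfold PySem.List.sorted2
  simp only [if_neg (by decide : ¬ (false = true))]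
  exact foldl_insertBy_pairwise _ (fun a b => bef_eq_pvLt a b) xs [] List.Pairwise.nil

-- ---- B-side helper characterisations ----

theorem bSpacing_eq (size : Int) (ms : Option Int) : bSpacing size ms = pvSpacing size ms := by
  cases ms <;> rfl

theorem bTargets_eq (size mc : Int) : bTargets size mc = pvTargets size mc := by
  by_cases h1 : mc = 1
  · simp [bTargets, pvTargets, h1]
  · by_cases h2 : mc = 2 <;> simp [bTargets, pvTargets, h1, h2]

theorem pvTargets_ne_nil (size mc : Int) : pvTargets size mc ≠ [] := by
  unfold pvTargets
  split_ifs <;> simp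

theorem bScoreGo_eq (c : Int) :
    ∀ (l : List Int) (b : Int), bScoreGo c l b = l.foldl (fun acc t => min acc |c - t|) b := by
  intro l
  induction l with
  | nil => intro b; rfl
  | cons t ts ih =>
    intro b
    rw [bScoreGo, List.foldl_cons, ih]
    congr 1
    simp only [min_def]
    split_ifs <;> omega

theorem bScore_eq (ts : List Int) (c : Int) (h : ts ≠ []) : bScore ts c = pvScore ts c := by
  cases ts with
  | nil => exact absurd rfl h
  | cons t rest =>
    simp [bScore, bScoreGo_eq, pvScore, PySem.List.min?_id_cons, List.foldl_map]

theorem bOk_eq (sp c : Int) : ∀ (ch : List Int), bOk sp c ch = pvQual sp ch c := by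
  intro ch
  induction ch with
  | nil => rfl
  | cons x xs ih =>
    by_cases h : |c - x| ≤ sp
    · simp [bOk, pvQual, h, show ¬ sp < |c - x| by omega]
    · simp [bOk, pvQual, h, show sp < |c - x| by omega, ih]

-- min2?'s fold step, rewritten through pvLt
def mStep (acc : Option (Int × Int)) (x : Int × Int) : Option (Int × Int) :=
  match acc with
  | none => some x
  | some m => if pvLt x m then some x else some m

theorem min2_eq_foldl (l : List (Int × Int)) :
    PySem.List.min2? l Prod.fst Prod.snd = l.foldl mStep none := by
  unfold PySem.List.min2?
  congr 1
  funext acc x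
  cases acc with
  | none => rfl
  | some m => simp only [mStep, bef_eq_pvLt]

theorem min2_fold_aux (l : List (Int × Int)) :
    ∀ (a : Int × Int), ∃ m, l.foldl mStep (some a) = some m ∧ (m ∈ l ∨ m = a) ∧
      (∀ e ∈ l, pvLt e m = false) ∧ (pvLt m a = true ∨ m = a) := by
  induction l with
  | nil => intro a; exact ⟨a, rfl, Or.inr rfl, by simp, Or.inr rfl⟩
  | cons x t ih =>
    intro a
    by_cases hxa : pvLt x a = true
    · obtain ⟨m, hm, hmem, hall, hrel⟩ := ih x
      refine ⟨m, ?_, ?_, ?_, Or.inl (lex2 hxa hrel)⟩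
      · rw [List.foldl_cons, show mStep (some a) x = some x from by simp [mStep, hxa]]; exact hm
      · rcases hmem with hmem | rfl
        · exact Or.inl (List.mem_cons_of_mem x hmem)
        · exact Or.inl List.mem_cons_self
      · intro e he
        rcases List.mem_cons.mp he with rfl | he
        · exact lex3 hrel
        · exact hall e he
    · have hxa' : pvLt x a = false := Bool.eq_false_iff.mpr hxa
      obtain ⟨m, hm, hmem, hall, hrel⟩ := ih a
      refine ⟨m, ?_, ?_, ?_, hrel⟩
      · rw [List.foldl_cons, show mStep (some a) x = some a from by simp [mStep, hxa']]; exact hm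
      · rcases hmem with hmem | rfl
        · exact Or.inl (List.mem_cons_of_mem x hmem)
        · exact Or.inr rfl
      · intro e he
        rcases List.mem_cons.mp he with rfl | he
        · exact lex1 hxa' hrel
        · exact hall e he

theorem min2_none {l : List (Int × Int)}
    (h : PySem.List.min2? l Prod.fst Prod.snd = none) : l = [] := by
  cases l with
  | nil => rfl
  | cons x t =>
    rw [min2_eq_foldl, List.foldl_cons, show mStep none x = some x from rfl] at h
    obtain ⟨m, hm, _⟩ := min2_fold_aux t x
    rw [hm] at h
    cases h

theorem min2_some {l : List (Int × Int)} {m : Int × Int}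
    (h : PySem.List.min2? l Prod.fst Prod.snd = some m) :
    m ∈ l ∧ ∀ e ∈ l, pvLt e m = false := by
  cases l with
  | nil => cases h
  | cons x t =>
    rw [min2_eq_foldl, List.foldl_cons, show mStep none x = some x from rfl] at h
    obtain ⟨m', hm', hmem, hall, hrel⟩ := min2_fold_aux t x
    rw [hm'] at h
    injection h with h
    subst h
    constructor
    · rcases hmem with hmem | rfl
      · exact List.mem_cons_of_mem x hmem
      · exact List.mem_cons_self
    · intro e he
      rcases List.mem_cons.mp he with rfl | he
      · exact lex3 hrel
      · exact hall e he

-- characterisation of B's per-round selection (filter + min)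
theorem bBest_spec (ms : Int) (ch : List Int) (p : List (Int × Int)) :
    (match PySem.List.min2? (p.filter (fun q => bOk ms q.2 ch)) Prod.fst Prod.snd with
     | none => ∀ e ∈ p, pvQual ms ch e.2 = false
     | some b => pvQual ms ch b.2 = true ∧ b ∈ p ∧
         (∀ e ∈ p, pvQual ms ch e.2 = true → pvLt e b = false)) := by
  cases hmin : PySem.List.min2? (p.filter (fun q => bOk ms q.2 ch)) Prod.fst Prod.snd with
  | none =>
    have hnil := min2_none hmin
    intro e he
    by_contra hq
    have hq' : pvQual ms ch e.2 = true := by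
      cases hcase : pvQual ms ch e.2
      · exact absurd hcase hq
      · rfl
    have : e ∈ p.filter (fun q => bOk ms q.2 ch) :=
      List.mem_filter.mpr ⟨he, by rw [bOk_eq]; exact hq'⟩
    rw [hnil] at this
    cases this
  | some b =>
    obtain ⟨hmem, hall⟩ := min2_some hmin
    have hb := List.mem_filter.mp hmem
    refine ⟨by rw [← bOk_eq]; exact hb.2, hb.1, ?_⟩
    intro e he hqe
    exact hall e (List.mem_filter.mpr ⟨he, by rw [bOk_eq]; exact hqe⟩)

-- A's scan returns chosen unchanged when nothing qualifies
theorem pickA_nonqual (ms mc : Int) :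
    ∀ (s : List (Int × Int)) (ch : List Int),
      (∀ e ∈ s, pvQual ms ch e.2 = false) → pickA ms mc s ch = ch := by
  intro s
  induction s with
  | nil => intro ch _; rfl
  | cons x rest ih =>
    intro ch h
    rcases x with ⟨k, c⟩
    have hq : pvQual ms ch c = false := h (k, c) List.mem_cons_self
    simp only [pickA, hq, if_false, Bool.false_eq_true]
    split
    · rfl
    · exact ih ch (fun e he => h e (List.mem_cons_of_mem _ he))

-- A's scan skips a non-qualifying prefix (when the break cannot fire on it)
theorem pickA_skip (ms mc : Int) :
    ∀ (q t : List (Int × Int)) (ch : List Int),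
      (∀ e ∈ q, pvQual ms ch e.2 = false) → (ch.length : Int) ≠ mc →
      pickA ms mc (q ++ t) ch = pickA ms mc t ch := by
  intro q
  induction q with
  | nil => intro t ch _ _; rfl
  | cons x rest ih =>
    intro t ch h hlen
    rcases x with ⟨k, c⟩
    have hq : pvQual ms ch c = false := h (k, c) List.mem_cons_self
    simp only [List.cons_append, pickA, hq, if_false, Bool.false_eq_true, if_neg hlen]
    exact ih t ch (fun e he => h e (List.mem_cons_of_mem _ he)) hlen

-- decompose a list at its first qualifying element
theorem split_first_qual (ms : Int) (ch : List Int) :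
    ∀ (s : List (Int × Int)), (∃ e ∈ s, pvQual ms ch e.2 = true) →
      ∃ q b r, s = q ++ b :: r ∧ (∀ e ∈ q, pvQual ms ch e.2 = false) ∧ pvQual ms ch b.2 = true := by
  intro s
  induction s with
  | nil => intro h; obtain ⟨e, he, _⟩ := h; cases he
  | cons x rest ih =>
    intro h
    by_cases hx : pvQual ms ch x.2 = true
    · exact ⟨[], x, rest, rfl, by simp, hx⟩
    · obtain ⟨e, he, hqe⟩ := h
      rcases List.mem_cons.mp he with rfl | he
      · exact absurd hqe hx
      · obtain ⟨q, b, r, hs, hq, hb⟩ := ih ⟨e, he, hqe⟩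
        exact ⟨x :: q, b, r, by rw [hs]; rfl,
          fun e' he' => by
            rcases List.mem_cons.mp he' with rfl | he'
            · exact Bool.eq_false_iff.mpr hx
            · exact hq e' he', hb⟩

-- main invariant: A's ordered scan = B's repeated filter-and-select loop
theorem main_inv (ms mc : Int) :
    ∀ (fuel : Nat) (p s d : List (Int × Int)) (ch : List Int),
      fuel = p.length →
      p.Perm (s ++ d) →
      s.Pairwise (fun a b => pvLt b a = false) →
      (∀ e ∈ d, pvQual ms ch e.2 = false) →
      (ch = [] ∨ (ch.length : Int) ≠ mc) →
      pickA ms mc s ch = bSelect ms mc fuel p ch := by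
  intro fuel
  induction fuel with
  | zero =>
    intro p s d ch hf hp hs hd hch
    have hp0 : p = [] := List.length_eq_zero_iff.mp hf.symm
    subst hp0
    have : s ++ d = [] := List.Perm.nil_eq hp |>.symm
    have hs0 : s = [] := (List.append_eq_nil_iff.mp this).1
    subst hs0
    rfl
  | succ n ih =>
    intro p s d ch hf hp hs hd hch
    by_cases hq : ∀ e ∈ s, pvQual ms ch e.2 = false
    · -- no candidate qualifies: both sides return ch
      have hspec := bBest_spec ms ch p
      have hnone : PySem.List.min2? (p.filter (fun q => bOk ms q.2 ch)) Prod.fst Prod.snd = none := by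
        revert hspec
        cases hb : PySem.List.min2? (p.filter (fun q => bOk ms q.2 ch)) Prod.fst Prod.snd with
        | none => intro _; rfl
        | some b =>
          intro hspec
          obtain ⟨hqb, hmem, _⟩ := hspec
          rcases List.mem_append.mp (hp.mem_iff.mp hmem) with h | h
          · exact absurd hqb (by simp [hq b h])
          · exact absurd hqb (by simp [hd b h])
      rw [pickA_nonqual ms mc s ch hq]
      simp [bSelect, hnone]
    · push Not at hq
      obtain ⟨e0, he0, hqe0⟩ := hq
      obtain ⟨q, b, r, hsplit, hqQ, hqb⟩ :=
        split_first_qual ms ch s ⟨e0, he0, eq_true_of_ne_false hqe0⟩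
      -- B picks exactly b
      have hbmem_s : b ∈ s := by rw [hsplit]; exact List.mem_append_right q List.mem_cons_self
      have hbmem_p : b ∈ p := hp.mem_iff.mpr (List.mem_append_left d hbmem_s)
      have hsQBR : (q ++ b :: r).Pairwise (fun a b => pvLt b a = false) := hsplit ▸ hs
      have hbr_pw := (List.pairwise_append.mp hsQBR).2.1
      have hb_min_r : ∀ e ∈ r, pvLt e b = false := (List.pairwise_cons.mp hbr_pw).1
      have hbB : PySem.List.min2? (p.filter (fun q => bOk ms q.2 ch)) Prod.fst Prod.snd = some b := by
        have hspec := bBest_spec ms ch p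
        revert hspec
        cases hb' : PySem.List.min2? (p.filter (fun q => bOk ms q.2 ch)) Prod.fst Prod.snd with
        | none =>
          intro hspec
          exact absurd hqb (by simp [hspec b hbmem_p])
        | some b' =>
          intro hspec
          obtain ⟨hqb', hmem', hmin'⟩ := hspec
          have h1 : pvLt b b' = false := hmin' b hbmem_p hqb
          have hb's : b' ∈ s ∨ b' ∈ d := List.mem_append.mp (hp.mem_iff.mp hmem')
          rcases hb's with hb's | hb'd
          · rw [hsplit] at hb's
            rcases List.mem_append.mp hb's with hb'q | hb'br
            · exact absurd hqb' (by simp [hqQ b' hb'q])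
            · rcases List.mem_cons.mp hb'br with rfl | hb'r
              · rfl
              · have h2 : pvLt b' b = false := hb_min_r b' hb'r
                rw [lex_antisymm h2 h1]
          · exact absurd hqb' (by simp [hd b' hb'd])
      -- A skips q
      have hAskip : pickA ms mc s ch = pickA ms mc (b :: r) ch := by
        rcases List.eq_nil_or_concat' q with rfl | _
        · rw [hsplit]; rfl
        · rw [hsplit]
          apply pickA_skip ms mc q (b :: r) ch hqQ
          rcases hch with rfl | hch
          · by_contra
            rcases List.eq_nil_or_concat' q with rfl | ⟨q', x, rfl⟩
            · simp at *
            · have := hqQ x (by simp)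
              simp [pvQual] at this
          · exact hch
      rcases b with ⟨bk, bc⟩
      rw [hAskip]
      simp only [pickA, bSelect, hbB, hqb, if_true]
      have hql : pvQual ms ch bc = true := hqb
      by_cases hlen : ((ch ++ [bc]).length : Int) = mc
      · rw [if_pos hlen, if_pos hlen]
      · rw [if_neg hlen, if_neg hlen]
        apply ih (p.erase (bk, bc)) r (d ++ q) (ch ++ [bc])
        · have := List.length_erase_of_mem hbmem_p
          omega
        · have hbq : (bk, bc) ∉ q := by
            intro hmem
            have := hqQ (bk, bc) hmem
            rw [hql] at this
            cases this
          have h1 : (p.erase (bk, bc)).Perm ((s ++ d).erase (bk, bc)) :=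
            hp.erase (bk, bc)
          have h2 : (s ++ d).erase (bk, bc) = q ++ (r ++ d) := by
            rw [hsplit, List.append_assoc, List.erase_append_right _ hbq]
            simp
          have h3 : (q ++ (r ++ d)).Perm (r ++ (d ++ q)) := by
            calc (q ++ (r ++ d)).Perm ((r ++ d) ++ q) := List.perm_append_comm
            _ = r ++ (d ++ q) := by rw [List.append_assoc]
          exact (h1.trans (h2 ▸ h3))
        · exact (List.pairwise_cons.mp hbr_pw).2
        · intro e he
          rcases List.mem_append.mp he with he | he
          · exact pvQual_mono (hd e he)
          · exact pvQual_mono (hqQ e he)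
        · exact Or.inr hlen

-- ===== VERDICT (by name: the statement is the Claim_ definition above) =====
theorem pick_up_to_n_py_spec : Claim_equal_pick_up_to_n_py := by
  intro cuts size max_cuts min_spacing _
  unfold Spec_pick_up_to_n_py pick_up_to_n_py pick_up_to_n_py_alt
  by_cases hc : cuts = []
  · rw [if_pos hc, if_pos hc]
  · rw [if_neg hc, if_neg hc]
    show PySem.List.sorted
        (pickA (pvSpacing size min_spacing) max_cuts
          (PySem.List.sorted2 (cuts.map (fun c => (pvScore (pvTargets size max_cuts) c, c)))
            Prod.fst Prod.snd) []) (fun x => x) =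
      PySem.List.sorted
        (bSelect (bSpacing size min_spacing) max_cuts
          (cuts.map (fun c => (bScore (bTargets size max_cuts) c, c))).length
          (cuts.map (fun c => (bScore (bTargets size max_cuts) c, c))) []) (fun x => x)
    rw [bSpacing_eq, bTargets_eq,
      show (fun c => (bScore (pvTargets size max_cuts) c, c))
          = (fun c => (pvScore (pvTargets size max_cuts) c, c)) from
        funext fun c => by rw [bScore_eq _ _ (pvTargets_ne_nil size max_cuts)]]
    congr 1
    apply main_inv
    · rfl
    · rw [List.append_nil]
      exact (PySem.List.sorted2_perm
        (cuts.map (fun c => (pvScore (pvTargets size max_cuts) c, c))) Prod.fst Prod.snd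
        false).symm
    · exact sorted2_pairwise' _
    · intro e he; cases he
    · exact Or.inl rfl
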